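-- pv_equiv track=rewrite | github.com/pigeonflight/UNEP.labdb | UNEP/labdb/setuphandlers.py | extract_phone_numbers
-- ===== SOURCE A (Python) =====
-- def extract_phone_numbers(tel_n_email,_field=None):
--     items = tel_n_email.split('\n')
--     phone_numbers = []
--     for item in items:
--         field = item.strip()
--         if _field == "Telephone":
--             phone_numbers.append({'phone_number':field})
--         _field = field
--     return phone_numbers
-- ===== SOURCE B (Python) =====
-- def extract_phone_numbers(tel_n_email, _field=None):
--     stripped = [s.strip() for s in tel_n_email.split('\n')]
--     prevs = [_field] + stripped[:-1]
--     return [{'phone_number': cur} for prev, cur in zip(prevs, stripped) if prev == 'Telephone']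
-- ===== Notes on version B (the rewrite author's own statement) =====
-- stated objective: idiomatic
-- what changed: Replaces the cross-iteration previous-line accumulator loop with a precomputed shifted predecessor list and a single zip comprehension over (previous, current) pairs.
import Mathlib
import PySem

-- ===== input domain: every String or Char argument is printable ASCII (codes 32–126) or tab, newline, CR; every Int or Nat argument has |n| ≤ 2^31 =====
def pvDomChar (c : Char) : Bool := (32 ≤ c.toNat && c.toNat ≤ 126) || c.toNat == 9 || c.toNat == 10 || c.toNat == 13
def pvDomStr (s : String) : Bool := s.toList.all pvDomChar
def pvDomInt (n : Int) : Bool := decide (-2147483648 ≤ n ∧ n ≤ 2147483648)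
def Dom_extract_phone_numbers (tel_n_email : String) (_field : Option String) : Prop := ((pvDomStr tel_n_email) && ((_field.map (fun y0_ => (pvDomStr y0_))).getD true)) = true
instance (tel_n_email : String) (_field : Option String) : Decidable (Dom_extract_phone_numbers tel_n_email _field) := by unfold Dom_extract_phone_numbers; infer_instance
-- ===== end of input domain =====

-- B replaces A's cross-iteration previous-line accumulator with a shifted predecessor
-- list zipped against the stripped lines (idiomatic; same cost).

-- ===== PORT A =====
-- literal port of A: loop over split lines carrying (phone_numbers, _field) state
def extract_phone_numbers (tel_n_email : String) (_field : Option String) : List (List (String × String)) :=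
  let items := (PySem.Str.split? tel_n_email "\n").getD []
  (items.foldl
    (fun (acc : List (List (String × String)) × Option String) item =>
      let field := PySem.Str.strip item
      ((if acc.2 = some "Telephone" then acc.1 ++ [[("phone_number", field)]] else acc.1),
       some field))
    ([], _field)).1

-- ===== PORT B =====
-- literal port of Source B: stripped lines, explicit predecessor list, one zip pass
def extract_phone_numbers_alt (tel_n_email : String) (_field : Option String) : List (List (String × String)) :=
  let stripped := ((PySem.Str.split? tel_n_email "\n").getD []).map PySem.Str.strip
  let prevs := _field :: stripped.dropLast.map some
  (prevs.zip stripped).filterMap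
    (fun pc => if pc.1 = some "Telephone" then some [("phone_number", pc.2)] else none)

-- ===== PRECONDITION & SPEC =====
def Spec_extract_phone_numbers (tel_n_email : String) (_field : Option String) (out : List (List (String × String))) : Prop := out = extract_phone_numbers_alt tel_n_email _field
instance (tel_n_email : String) (_field : Option String) (out : List (List (String × String))) : Decidable (Spec_extract_phone_numbers tel_n_email _field out) := by unfold Spec_extract_phone_numbers; infer_instance

-- ===== CLAIM (what is proved, stated in full; the proofs are below) =====
def Claim_equal_extract_phone_numbers : Prop := ∀ (tel_n_email : String) (_field : Option String), Dom_extract_phone_numbers tel_n_email _field → Spec_extract_phone_numbers tel_n_email _field (extract_phone_numbers tel_n_email _field)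

-- ===== LEMMAS AND PROOFS =====

-- zip truncates to the shorter list, so dropping the last predecessor is invisible
theorem pv_zip_dropLast (l : List String) (f : Option String) :
    (f :: l.dropLast.map some).zip l = (f :: l.map some).zip l := by
  induction l generalizing f with
  | nil => rfl
  | cons x xs ih =>
    cases xs with
    | nil => rfl
    | cons y ys =>
      simp only [List.dropLast, List.map_cons, List.zip_cons_cons, List.cons.injEq, true_and]
      simpa [List.dropLast] using ih (some x)

-- A's fold over the raw lines equals B's zip-filter over the stripped lines
theorem pv_fold_eq_zip (items : List String) (f : Option String)
    (acc : List (List (String × String))) :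
    (items.foldl
      (fun (st : List (List (String × String)) × Option String) item =>
        let field := PySem.Str.strip item
        ((if st.2 = some "Telephone" then st.1 ++ [[("phone_number", field)]] else st.1),
         some field))
      (acc, f)).1
    = acc ++ ((f :: (items.map PySem.Str.strip).map some).zip (items.map PySem.Str.strip)).filterMap
        (fun pc => if pc.1 = some "Telephone" then some [("phone_number", pc.2)] else none) := by
  induction items generalizing f acc with
  | nil => simp
  | cons x xs ih =>
    simp only [List.foldl_cons, List.map_cons, List.zip_cons_cons, List.filterMap_cons]
    rw [ih]
    by_cases hf : f = some "Telephone" <;> simp [hf]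

-- ===== VERDICT (by name: the statement is the Claim_ definition above) =====
theorem extract_phone_numbers_spec : Claim_equal_extract_phone_numbers := by
  intro s f _
  unfold Spec_extract_phone_numbers extract_phone_numbers extract_phone_numbers_alt
  simp only []
  rw [pv_zip_dropLast]
  exact pv_fold_eq_zip _ f []
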